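-- pv_equiv track=rewrite | github.com/scliff108/Advent-of-Code-2024 | src/day1.py | part2
-- ===== SOURCE A (Python) =====
-- def part2(l1: list, l2: list) -> int:
--     counts = dict()
--     for item in l2:
--         counts[item] = counts.get(item, 0) + 1
--
--     total = 0
--     for item in l1:
--         total += counts.get(item, 0) * item
--
--     return total
-- ===== SOURCE B (Python) =====
-- def part2(l1: list, l2: list) -> int:
--     # Group-by-distinct-value algorithm: each distinct value v contributes
--     # v * (occurrences of v in l1) * (occurrences of v in l2).
--     total = 0
--     for v in set(l1):
--         total += v * l1.count(v) * l2.count(v)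
--     return total
-- ===== Notes on version B (the rewrite author's own statement) =====
-- stated objective: alternative
-- what changed: B replaces A's build-a-count-dict-then-sum-per-element-of-l1 scheme by a group-by-distinct-values aggregation: it iterates over set(l1) once and adds v * l1.count(v) * l2.count(v) per distinct value, so duplicates in l1 are handled by multiplication instead of repeated addition.
import Mathlib
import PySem

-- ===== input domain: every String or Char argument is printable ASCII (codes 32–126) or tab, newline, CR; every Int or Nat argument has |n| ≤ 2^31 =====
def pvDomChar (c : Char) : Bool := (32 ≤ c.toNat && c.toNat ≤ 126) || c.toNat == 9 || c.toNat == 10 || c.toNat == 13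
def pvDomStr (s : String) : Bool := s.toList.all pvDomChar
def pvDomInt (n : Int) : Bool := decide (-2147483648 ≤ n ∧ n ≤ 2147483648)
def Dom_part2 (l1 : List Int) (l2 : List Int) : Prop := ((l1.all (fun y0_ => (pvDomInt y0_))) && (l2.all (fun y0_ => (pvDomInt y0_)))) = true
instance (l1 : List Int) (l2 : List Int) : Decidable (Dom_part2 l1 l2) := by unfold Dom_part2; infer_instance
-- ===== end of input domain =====

-- B replaces A's dict-then-per-element-sum with a group-by-distinct-values aggregation over set(l1).


-- ===== PORT A =====
def part2 (l1 : List Int) (l2 : List Int) : Int :=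
  let counts := l2.foldl (fun d item => d.insert item (d.getD item 0 + 1)) PySem.Dict.empty
  l1.foldl (fun total item => total + counts.getD item 0 * item) 0

-- ===== PORT B =====
def part2_alt (l1 : List Int) (l2 : List Int) : Int :=
  (PySem.Set.ofList l1).foldl
    (fun total v => total + v * PySem.List.count l1 v * PySem.List.count l2 v) 0

-- ===== PRECONDITION & SPEC =====
def Spec_part2 (l1 : List Int) (l2 : List Int) (out : Int) : Prop := out = part2_alt l1 l2
instance (l1 : List Int) (l2 : List Int) (out : Int) : Decidable (Spec_part2 l1 l2 out) := by unfold Spec_part2; infer_instance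

-- ===== CLAIM (what is proved, stated in full; the proofs are below) =====
def Claim_equal_part2 : Prop := ∀ (l1 : List Int) (l2 : List Int), Dom_part2 l1 l2 → Spec_part2 l1 l2 (part2 l1 l2)

-- ===== LEMMAS AND PROOFS =====
-- sum over l1 of f, regrouped by distinct values with multiplicities
theorem pv_sum_group (l : List Int) (f : Int → Int) :
    ((PySem.Set.ofList l).map (fun v => ((List.count v l : Int)) * f v)).sum
      = (l.map f).sum := by
  rw [Finset.sum_list_map_count l f,
    ← List.sum_toFinset _ (PySem.Set.nodup_ofList l)]
  refine Finset.sum_congr ?_ (fun x _ => by rw [nsmul_eq_mul])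
  ext x; simp [PySem.Set.mem_ofList]

-- ===== VERDICT (by name: the statement is the Claim_ definition above) =====
theorem part2_spec : Claim_equal_part2 := by
  intro l1 l2 _
  unfold Spec_part2 part2 part2_alt
  simp only [PySem.Dict.foldl_insert_getD_add_one_eq_counter, PySem.Dict.getD_counter,
    PySem.List.foldl_add, zero_add, PySem.List.count_eq]
  rw [← pv_sum_group l1 (fun x => (List.count x l2 : Int) * x)]
  exact congrArg List.sum (List.map_congr_left (fun v _ => by ring))
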